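-- pv_equiv track=rewrite | github.com/hugosuarezbenjumeda-ctrl/Medical-IoMT- | scripts/evaluate_xgb_robustness.py | find_feature_index
-- ===== SOURCE A (Python) =====
-- from typing import Any, Callable, Dict, List, Optional, Sequence, Tuple
--
-- def feature_name_key(name: str) -> str:
--     return "".join(ch.lower() for ch in str(name) if ch.isalnum())
--
-- def find_feature_index(
--     feature_columns: Sequence[str],
--     exact_aliases: Sequence[str],
--     key_aliases: Sequence[str],
-- ) -> Optional[int]:
--     direct: Dict[str, int] = {}
--     keyed: Dict[str, int] = {}
--     for idx, name in enumerate(feature_columns):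
--         direct.setdefault(str(name).strip().lower(), int(idx))
--         keyed.setdefault(feature_name_key(str(name)), int(idx))
--
--     for alias in exact_aliases:
--         idx = direct.get(str(alias).strip().lower())
--         if idx is not None:
--             return int(idx)
--     for alias in key_aliases:
--         idx = keyed.get(feature_name_key(alias))
--         if idx is not None:
--             return int(idx)
--     return None
-- ===== SOURCE B (Python) =====
-- def feature_name_key(name: str) -> str:
--     return "".join(ch.lower() for ch in str(name) if ch.isalnum())
--
--
-- def find_feature_index(feature_columns, exact_aliases, key_aliases):
--     # Single pass over the columns: compute each column's best alias "rank"
--     # (exact aliases rank 0..ne-1, key aliases rank ne..) and keep the column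
--     # with the lexicographically smallest (rank, index) pair.
--     exact_targets = [str(a).strip().lower() for a in exact_aliases]
--     key_targets = [feature_name_key(a) for a in key_aliases]
--     ne = len(exact_targets)
--     best = None
--     for idx, name in enumerate(feature_columns):
--         e = str(name).strip().lower()
--         rank = None
--         for j, t in enumerate(exact_targets):
--             if t == e:
--                 rank = j
--                 break
--         if rank is None:
--             k = feature_name_key(str(name))
--             for j, t in enumerate(key_targets):
--                 if t == k:
--                     rank = ne + j
--                     break
--         if rank is not None and (best is None or (rank, idx) < best):
--             best = (rank, idx)
--     return None if best is None else best[1]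
-- ===== Notes on version B (the rewrite author's own statement) =====
-- stated objective: alternative
-- what changed: Replaces A's precomputed first-index dicts queried alias-by-alias with a single column-major pass that computes each column's best alias rank (exact aliases before key aliases) and keeps the lexicographically minimal (rank, index) pair.
import Mathlib
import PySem

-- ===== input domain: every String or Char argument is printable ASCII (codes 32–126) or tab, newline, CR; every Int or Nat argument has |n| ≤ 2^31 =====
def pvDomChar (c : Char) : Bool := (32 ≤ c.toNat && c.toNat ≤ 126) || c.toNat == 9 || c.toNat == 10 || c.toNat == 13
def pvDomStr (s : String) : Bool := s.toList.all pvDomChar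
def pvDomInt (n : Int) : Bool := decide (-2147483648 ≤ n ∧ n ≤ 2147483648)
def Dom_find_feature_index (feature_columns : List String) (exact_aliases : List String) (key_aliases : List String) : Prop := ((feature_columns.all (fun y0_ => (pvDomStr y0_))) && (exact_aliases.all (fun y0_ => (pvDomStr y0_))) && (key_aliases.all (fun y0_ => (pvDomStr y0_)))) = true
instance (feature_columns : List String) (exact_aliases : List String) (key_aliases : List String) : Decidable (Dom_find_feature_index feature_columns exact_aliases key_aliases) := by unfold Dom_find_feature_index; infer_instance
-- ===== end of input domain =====

-- B replaces A's two precomputed alias-index dicts with one column-major pass keeping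
-- the lexicographically minimal (alias rank, column index) pair; same return value.

-- shared normalizations (the module helper feature_name_key and str(name).strip().lower())
-- str(name).strip().lower() as a List Char (exact on the ASCII domain)
def normExact (s : String) : List Char := PySem.Chars.lower (PySem.Chars.strip s.toList)
-- feature_name_key: keep alphanumeric chars, lowercase each (ch.lower() is one char on ASCII)
def normKey (s : String) : List Char := (s.toList.filter PySem.Chars.isalnum).map PySem.Chars.lowerChar

-- ===== PORT A =====
-- the enumerate loop building the two setdefault dicts (state: direct, keyed, idx)
def buildStep (st : PySem.Dict (List Char) Int × PySem.Dict (List Char) Int × Int) (name : String) :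
    PySem.Dict (List Char) Int × PySem.Dict (List Char) Int × Int :=
  (st.1.setdefault (normExact name) st.2.2, st.2.1.setdefault (normKey name) st.2.2, st.2.2 + 1)

-- the alias lookup loop: return the first alias whose normalized form is in the dict
def lookupLoop (d : PySem.Dict (List Char) Int) (norm : String → List Char) : List String → Option Int
  | [] => none
  | a :: rest =>
    match d.get? (norm a) with
    | some i => some i
    | none => lookupLoop d norm rest

def find_feature_index (feature_columns : List String) (exact_aliases : List String) (key_aliases : List String) : Option Int :=
  let st := feature_columns.foldl buildStep (PySem.Dict.empty, PySem.Dict.empty, 0)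
  match lookupLoop st.1 normExact exact_aliases with
  | some i => some i
  | none => lookupLoop st.2.1 normKey key_aliases

-- ===== PORT B =====
-- the inner 'for j, t in enumerate(targets): if t == x: rank = j; break' loop
def firstIdx : List (List Char) → List Char → Int → Option Int
  | [], _, _ => none
  | t :: ts, x, j => if t == x then some j else firstIdx ts x (j + 1)

-- one column's rank: first exact-alias match, else ne + first key-alias match
def colRank (tsE tsK : List (List Char)) (ne : Int) (name : String) : Option Int :=
  match firstIdx tsE (normExact name) 0 with
  | some j => some j
  | none =>
    match firstIdx tsK (normKey name) 0 with
    | some j => some (ne + j)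
    | none => none

-- Python tuple comparison (rank, idx) < best
def pairLt (p q : Int × Int) : Bool := p.1 < q.1 || (p.1 == q.1 && p.2 < q.2)

-- the enumerate loop over columns (state: best, idx)
def bestStep (tsE tsK : List (List Char)) (ne : Int)
    (st : Option (Int × Int) × Int) (name : String) : Option (Int × Int) × Int :=
  let best :=
    match colRank tsE tsK ne name with
    | some r =>
      match st.1 with
      | none => some (r, st.2)
      | some b => if pairLt (r, st.2) b then some (r, st.2) else st.1
    | none => st.1
  (best, st.2 + 1)

def find_feature_index_alt (feature_columns : List String) (exact_aliases : List String) (key_aliases : List String) : Option Int :=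
  let tsE := exact_aliases.map normExact
  let tsK := key_aliases.map normKey
  let ne : Int := tsE.length
  let st := feature_columns.foldl (bestStep tsE tsK ne) (none, 0)
  match st.1 with
  | none => none
  | some b => some b.2

-- ===== PRECONDITION & SPEC =====
def Spec_find_feature_index (feature_columns : List String) (exact_aliases : List String) (key_aliases : List String) (out : Option Int) : Prop := out = find_feature_index_alt feature_columns exact_aliases key_aliases
instance (feature_columns : List String) (exact_aliases : List String) (key_aliases : List String) (out : Option Int) : Decidable (Spec_find_feature_index feature_columns exact_aliases key_aliases out) := by unfold Spec_find_feature_index; infer_instance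

-- ===== CLAIM (what is proved, stated in full; the proofs are below) =====
def Claim_equal_find_feature_index : Prop := ∀ (feature_columns : List String) (exact_aliases : List String) (key_aliases : List String), Dom_find_feature_index feature_columns exact_aliases key_aliases → Spec_find_feature_index feature_columns exact_aliases key_aliases (find_feature_index feature_columns exact_aliases key_aliases)

-- ===== LEMMAS AND PROOFS =====

-- ---- generalized reference: a list of column predicates, alias-major scan (gRef) ----
def scanP (P : String → Bool) : List String → Int → Option Int
  | [], _ => none
  | c :: cs, i => if P c then some i else scanP P cs (i + 1)

def gRef : List (String → Bool) → List String → Option Int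
  | [], _ => none
  | P :: Ps, cols =>
    match scanP P cols 0 with
    | some i => some i
    | none => gRef Ps cols

-- rank of a column against a predicate list
def rankP : List (String → Bool) → String → Int → Option Int
  | [], _, _ => none
  | P :: Ps, c, i => if P c then some i else rankP Ps c (i + 1)

-- column-major fold over cols using rankP
def stepP (Ps : List (String → Bool)) (st : Option (Int × Int) × Int) (name : String) :
    Option (Int × Int) × Int :=
  let best :=
    match rankP Ps name 0 with
    | some r =>
      match st.1 with
      | none => some (r, st.2)
      | some b => if pairLt (r, st.2) b then some (r, st.2) else st.1
    | none => st.1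
  (best, st.2 + 1)

-- ---- A side: dicts answer what a direct scan answers ----
def scanCols (norm : String → List Char) (target : List Char) : List String → Int → Option Int
  | [], _ => none
  | name :: rest, i => if norm name == target then some i else scanCols norm target rest (i + 1)

def phaseA (norm : String → List Char) (cols : List String) : List String → Option Int
  | [] => none
  | a :: rest =>
    match scanCols norm (norm a) cols 0 with
    | some i => some i
    | none => phaseA norm cols rest

theorem get?_mk_append (l : List (List Char × Int)) (key : List Char) (v : Int) (t : List Char) :
    (PySem.Dict.mk (l ++ [(key, v)])).get? t
      = ((PySem.Dict.mk l).get? t).or (if key = t then some v else none) := by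
  induction l with
  | nil =>
    by_cases h : key = t <;> simp [PySem.Dict.get?, h]
  | cons p rest ih =>
    rcases p with ⟨k, w⟩
    by_cases h : k = t
    · simp [PySem.Dict.get?_mk_cons, h]
    · simp [PySem.Dict.get?_mk_cons, h, ih]

theorem get?_setdefault (d : PySem.Dict (List Char) Int) (key : List Char) (v : Int) (t : List Char) :
    (d.setdefault key v).get? t = (d.get? t).or (if key = t then some v else none) := by
  unfold PySem.Dict.setdefault
  by_cases hc : d.contains key
  · simp only [hc, if_true]
    by_cases ht : key = t
    · subst ht
      have : (d.get? key).isSome := by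
        rw [← PySem.Dict.contains_eq_isSome_get?]; exact hc
      rcases Option.isSome_iff_exists.mp this with ⟨w, hw⟩
      simp [hw]
    · simp [ht]
  · simp only [hc, Bool.false_eq_true, if_false]
    exact get?_mk_append d.items key v t

theorem build_get?_scan (cols : List String) (d k : PySem.Dict (List Char) Int) (i : Int) (t : List Char) :
    ((cols.foldl buildStep (d, k, i)).1.get? t = (d.get? t).or (scanCols normExact t cols i))
    ∧ ((cols.foldl buildStep (d, k, i)).2.1.get? t = (k.get? t).or (scanCols normKey t cols i)) := by
  induction cols generalizing d k i with
  | nil => simp [scanCols]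
  | cons name rest ih =>
    have h := ih (d.setdefault (normExact name) i) (k.setdefault (normKey name) i) (i + 1)
    constructor
    · rw [List.foldl_cons]
      show ((rest.foldl buildStep (d.setdefault (normExact name) i, k.setdefault (normKey name) i, i + 1)).1.get? t) = _
      rw [h.1, get?_setdefault]
      simp [scanCols]
      by_cases ht : normExact name = t <;> simp [ht]
    · rw [List.foldl_cons]
      show ((rest.foldl buildStep (d.setdefault (normExact name) i, k.setdefault (normKey name) i, i + 1)).2.1.get? t) = _
      rw [h.2, get?_setdefault]
      simp [scanCols]
      by_cases ht : normKey name = t <;> simp [ht]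

theorem lookup_eq_phaseA (cols : List String) (norm : String → List Char)
    (d : PySem.Dict (List Char) Int)
    (hd : ∀ t, d.get? t = scanCols norm t cols 0) (aliases : List String) :
    lookupLoop d norm aliases = phaseA norm cols aliases := by
  induction aliases with
  | nil => rfl
  | cons a rest ih => simp [lookupLoop, phaseA, hd, ih]

-- A equals the alias-major scans
theorem A_eq_phases (cols ea ka : List String) :
    find_feature_index cols ea ka
      = match phaseA normExact cols ea with
        | some i => some i
        | none => phaseA normKey cols ka := by
  unfold find_feature_index
  have h := fun t => build_get?_scan cols PySem.Dict.empty PySem.Dict.empty 0 t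
  have h1 : lookupLoop (cols.foldl buildStep (PySem.Dict.empty, PySem.Dict.empty, 0)).1 normExact ea
      = phaseA normExact cols ea := by
    apply lookup_eq_phaseA
    intro t
    rw [(h t).1]
    simp [PySem.Dict.get?_empty]
  have h2 : lookupLoop (cols.foldl buildStep (PySem.Dict.empty, PySem.Dict.empty, 0)).2.1 normKey ka
      = phaseA normKey cols ka := by
    apply lookup_eq_phaseA
    intro t
    rw [(h t).2]
    simp [PySem.Dict.get?_empty]
  simp only [h1, h2]

-- ---- phases = gRef on the unified predicate list ----
theorem beq_comm_lc (x y : List Char) : (x == y) = (y == x) := by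
  by_cases h : x = y
  · subst h; rfl
  · simp [h, Ne.symm h]

theorem scanCols_eq_scanP (norm : String → List Char) (a : String) (cols : List String) (i : Int) :
    scanCols norm (norm a) cols i = scanP (fun c => norm a == norm c) cols i := by
  induction cols generalizing i with
  | nil => rfl
  | cons c cs ih => simp [scanCols, scanP, beq_comm_lc, ih]

theorem phaseA_eq_gRef (norm : String → List Char) (cols aliases : List String) :
    phaseA norm cols aliases = gRef (aliases.map (fun a => fun c => norm a == norm c)) cols := by
  induction aliases with
  | nil => rfl
  | cons a rest ih => simp [phaseA, gRef, scanCols_eq_scanP, ih]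

theorem gRef_append (P1 P2 : List (String → Bool)) (cols : List String) :
    gRef (P1 ++ P2) cols
      = match gRef P1 cols with
        | some i => some i
        | none => gRef P2 cols := by
  induction P1 with
  | nil => rfl
  | cons P Ps ih =>
    simp only [List.cons_append, gRef, ih]
    cases scanP P cols 0 <;> rfl

-- ---- B equals the column-major fold with rankP ----
theorem rankP_shift (Ps : List (String → Bool)) (c : String) (i : Int) :
    rankP Ps c i = (rankP Ps c 0).map (fun r => r + i) := by
  induction Ps generalizing i with
  | nil => rfl
  | cons P Ps ih =>
    by_cases h : P c
    · simp [rankP, h]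
    · simp only [rankP, h, Bool.false_eq_true, if_false]
      rw [ih (i + 1), ih (0 + 1), Option.map_map]
      congr 1
      funext r
      simp only [Function.comp_apply]
      omega

theorem rankP_append (P1 P2 : List (String → Bool)) (c : String) :
    rankP (P1 ++ P2) c 0
      = match rankP P1 c 0 with
        | some j => some j
        | none => (rankP P2 c 0).map (fun r => r + (P1.length : Int)) := by
  induction P1 with
  | nil => simp [rankP]
  | cons P Ps ih =>
    by_cases h : P c
    · simp [rankP, h]
    · simp only [List.cons_append, rankP, h, Bool.false_eq_true, if_false]
      rw [rankP_shift (Ps ++ P2) c (0 + 1), ih, rankP_shift Ps c (0 + 1)]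
      cases hp : rankP Ps c 0 with
      | some j => simp
      | none =>
        simp only [Option.map_none, Option.map_map]
        cases hq : rankP P2 c 0 with
        | none => simp
        | some r =>
          simp only [Option.map_some, Function.comp_apply]
          congr 1
          simp only [List.length_cons]
          push_cast
          omega

theorem firstIdx_map (f : String → List Char) (as : List String) (name : String) (i : Int) :
    firstIdx (as.map f) (f name) i = rankP (as.map (fun a => fun c => f a == f c)) name i := by
  induction as generalizing i with
  | nil => rfl
  | cons a rest ih => simp [firstIdx, rankP, ih]

theorem colRank_eq_rankP (ea ka : List String) (name : String) :
    colRank (ea.map normExact) (ka.map normKey) ((ea.map normExact).length : Int) name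
      = rankP ((ea.map (fun a => fun c => normExact a == normExact c))
                ++ (ka.map (fun a => fun c => normKey a == normKey c))) name 0 := by
  unfold colRank
  rw [firstIdx_map normExact ea name 0, firstIdx_map normKey ka name 0, rankP_append]
  cases rankP (ea.map (fun a => fun c => normExact a == normExact c)) name 0
  · simp only
    cases rankP (ka.map (fun a => fun c => normKey a == normKey c)) name 0
    · rfl
    · simp only [Option.map_some]
      congr 1
      simp [Int.add_comm]
  · rfl

theorem bestStep_eq_stepP (ea ka : List String) :
    bestStep (ea.map normExact) (ka.map normKey) ((ea.map normExact).length : Int)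
      = stepP ((ea.map (fun a => fun c => normExact a == normExact c))
                ++ (ka.map (fun a => fun c => normKey a == normKey c))) := by
  funext st name
  unfold bestStep stepP
  rw [colRank_eq_rankP]

-- ---- column-major fold = gRef (induction on the predicate list) ----
theorem rankP_ge (Ps : List (String → Bool)) (c : String) (i r : Int)
    (h : rankP Ps c i = some r) : i ≤ r := by
  induction Ps generalizing i with
  | nil => simp [rankP] at h
  | cons P Ps ih =>
    by_cases hp : P c
    · simp [rankP, hp] at h; omega
    · simp only [rankP, hp, Bool.false_eq_true, if_false] at h
      have := ih (i + 1) h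
      omega

theorem run_nil (cols : List String) (st : Option (Int × Int) × Int) :
    (cols.foldl (stepP []) st).1 = st.1 := by
  induction cols generalizing st with
  | nil => rfl
  | cons c cs ih => simp [stepP, rankP, ih]

-- once best = (0, i0) with i0 < current index, it never changes
theorem run_stay (Ps : List (String → Bool)) (cols : List String) (i i0 : Int) (h : i0 < i) :
    (cols.foldl (stepP Ps) (some (0, i0), i)).1 = some (0, i0) := by
  induction cols generalizing i with
  | nil => rfl
  | cons c cs ih =>
    rw [List.foldl_cons]
    have hstep : stepP Ps (some (0, i0), i) c = (some (0, i0), i + 1) := by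
      unfold stepP
      cases hr : rankP Ps c 0 with
      | none => rfl
      | some r =>
        have hr0 : (0 : Int) ≤ r := rankP_ge Ps c 0 r hr
        have : pairLt (r, i) (0, i0) = false := by
          simp [pairLt]
          omega
        simp [this]
    rw [hstep]
    exact ih (i + 1) (by omega)

-- invariant carried before the first P-match: best is none or has rank ≥ 1
def InvB (b : Option (Int × Int)) : Prop := b = none ∨ ∃ r j, b = some (r, j) ∧ 1 ≤ r

theorem run_found (P : String → Bool) (Ps : List (String → Bool)) (cols : List String)
    (i i0 : Int) (b : Option (Int × Int)) (hb : InvB b)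
    (h : scanP P cols i = some i0) :
    (cols.foldl (stepP (P :: Ps)) (b, i)).1 = some (0, i0) := by
  induction cols generalizing i b with
  | nil => simp [scanP] at h
  | cons c cs ih =>
    rw [List.foldl_cons]
    by_cases hp : P c
    · have hi0 : i0 = i := by simp [scanP, hp] at h; omega
      subst hi0
      have hstep : stepP (P :: Ps) (b, i0) c = (some (0, i0), i0 + 1) := by
        unfold stepP
        have hr : rankP (P :: Ps) c 0 = some 0 := by simp [rankP, hp]
        rw [hr]
        rcases hb with hb | ⟨r, j, hb, hr1⟩
        · subst hb; rfl
        · subst hb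
          have : pairLt (0, i0) (r, j) = true := by simp [pairLt]; omega
          simp [this]
      rw [hstep]
      exact run_stay (P :: Ps) cs (i0 + 1) i0 (by omega)
    · have hcs : scanP P cs (i + 1) = some i0 := by
        simpa [scanP, hp] using h
      have hstep : ∃ b', stepP (P :: Ps) (b, i) c = (b', i + 1) ∧ InvB b' := by
        unfold stepP
        have hr : rankP (P :: Ps) c 0 = rankP Ps c 1 := by simp [rankP, hp]
        rw [hr]
        cases hrr : rankP Ps c 1 with
        | none => exact ⟨b, rfl, hb⟩
        | some r =>
          have hr1 : (1 : Int) ≤ r := rankP_ge Ps c 1 r hrr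
          rcases hb with hb | ⟨r0, j0, hb, hr0⟩
          · subst hb
            exact ⟨some (r, i), rfl, Or.inr ⟨r, i, rfl, hr1⟩⟩
          · subst hb
            by_cases hlt : pairLt (r, i) (r0, j0)
            · refine ⟨some (r, i), ?_, Or.inr ⟨r, i, rfl, hr1⟩⟩
              simp [hlt]
            · refine ⟨some (r0, j0), ?_, Or.inr ⟨r0, j0, rfl, hr0⟩⟩
              simp [hlt]
      rcases hstep with ⟨b', hstep, hb'⟩
      rw [hstep]
      exact ih (i + 1) b' hb' hcs

-- rank-shift: with P matching nothing, the (P :: Ps) fold is the Ps fold with ranks +1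
def shB (b : Option (Int × Int)) : Option (Int × Int) := b.map (fun p => (p.1 + 1, p.2))

theorem run_shift (P : String → Bool) (Ps : List (String → Bool)) (cols : List String)
    (hP : ∀ c ∈ cols, P c = false) (i : Int) (b : Option (Int × Int)) :
    (cols.foldl (stepP (P :: Ps)) (shB b, i)).1 = shB (cols.foldl (stepP Ps) (b, i)).1 := by
  induction cols generalizing i b with
  | nil => rfl
  | cons c cs ih =>
    have hc : P c = false := hP c (List.mem_cons_self ..)
    have hcs : ∀ c' ∈ cs, P c' = false := fun c' hc' => hP c' (List.mem_cons_of_mem _ hc')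
    rw [List.foldl_cons, List.foldl_cons]
    have hstep : stepP (P :: Ps) (shB b, i) c
        = (shB (stepP Ps (b, i) c).1, i + 1) := by
      unfold stepP
      have hr : rankP (P :: Ps) c 0 = (rankP Ps c 0).map (fun r => r + 1) := by
        simp only [rankP, hc, Bool.false_eq_true, if_false]
        exact rankP_shift Ps c 1
      rw [hr]
      cases hrr : rankP Ps c 0 with
      | none => rfl
      | some r =>
        cases hbb : b with
        | none => rfl
        | some p =>
          rcases p with ⟨r0, j0⟩
          have hlt : pairLt (r + 1, i) (r0 + 1, j0) = pairLt (r, i) (r0, j0) := by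
            apply Bool.eq_iff_iff.mpr
            simp [pairLt]
          simp only [Option.map_some, shB, hlt]
          by_cases h : pairLt (r, i) (r0, j0) = true <;> simp [h]
    rw [hstep]
    have h2 : stepP Ps (b, i) c = ((stepP Ps (b, i) c).1, i + 1) := rfl
    rw [ih hcs, ← h2]

theorem scanP_none (P : String → Bool) (cols : List String) (i : Int)
    (h : scanP P cols i = none) : ∀ c ∈ cols, P c = false := by
  induction cols generalizing i with
  | nil => intro c hc; simp at hc
  | cons c cs ih =>
    intro c' hc'
    by_cases hp : P c
    · simp [scanP, hp] at h
    · rcases List.mem_cons.mp hc' with h' | h'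
      · subst h'; exact eq_false_of_ne_true hp
      · exact ih (i + 1) (by simpa [scanP, hp] using h) c' h'

theorem run_eq_gRef (Ps : List (String → Bool)) (cols : List String) :
    ((cols.foldl (stepP Ps) (none, 0)).1).map (fun p => p.2) = gRef Ps cols := by
  induction Ps with
  | nil => simp [run_nil, gRef]
  | cons P Ps ih =>
    cases hs : scanP P cols 0 with
    | some i0 =>
      rw [run_found P Ps cols 0 i0 none (Or.inl rfl) hs]
      simp [gRef, hs]
    | none =>
      have hP := scanP_none P cols 0 hs
      have hsh : (none : Option (Int × Int)) = shB none := rfl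
      rw [hsh, run_shift P Ps cols hP 0 none]
      simp only [gRef, hs]
      rw [← ih]
      cases (cols.foldl (stepP Ps) (none, 0)).1 <;> rfl

-- B equals gRef on the unified predicate list
theorem B_eq_gRef (cols ea ka : List String) :
    find_feature_index_alt cols ea ka
      = gRef ((ea.map (fun a => fun c => normExact a == normExact c))
                ++ (ka.map (fun a => fun c => normKey a == normKey c))) cols := by
  simp only [find_feature_index_alt, bestStep_eq_stepP]
  rw [← run_eq_gRef]
  cases (cols.foldl (stepP _) (none, 0)).1 <;> rfl

-- ===== VERDICT (by name: the statement is the Claim_ definition above) =====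
theorem find_feature_index_spec : Claim_equal_find_feature_index := by
  intro cols ea ka _
  unfold Spec_find_feature_index
  rw [A_eq_phases, B_eq_gRef, gRef_append,
    phaseA_eq_gRef normExact cols ea, phaseA_eq_gRef normKey cols ka]
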